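-- pv_equiv track=rewrite | github.com/runstr/advent_of__code | Day3/day3_2.py | convert_to_binary_numbers
-- ===== SOURCE A (Python) =====
-- def convert_to_binary_numbers(input_full):
--     numbers = {}
--     for line in input_full:
--         for i in range(0, len(line)):
--             try:
--                 numbers[i] += line[i]
--             except KeyError:
--                 numbers[i]=line[i]
--     return numbers
-- ===== SOURCE B (Python) =====
-- def convert_to_binary_numbers(input_full):
--     maxlen = max((len(line) for line in input_full), default=0)
--     return {i: ''.join(line[i] for line in input_full if i < len(line))
--             for i in range(maxlen)}
-- ===== Notes on version B (the rewrite author's own statement) =====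
-- stated objective: faster
-- what changed: B inverts A's row-major dict accumulation into a column-major build: it computes the maximum line length first and completes each column string with one join, instead of growing every dict entry by one character per row via string +=.
import Mathlib
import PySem

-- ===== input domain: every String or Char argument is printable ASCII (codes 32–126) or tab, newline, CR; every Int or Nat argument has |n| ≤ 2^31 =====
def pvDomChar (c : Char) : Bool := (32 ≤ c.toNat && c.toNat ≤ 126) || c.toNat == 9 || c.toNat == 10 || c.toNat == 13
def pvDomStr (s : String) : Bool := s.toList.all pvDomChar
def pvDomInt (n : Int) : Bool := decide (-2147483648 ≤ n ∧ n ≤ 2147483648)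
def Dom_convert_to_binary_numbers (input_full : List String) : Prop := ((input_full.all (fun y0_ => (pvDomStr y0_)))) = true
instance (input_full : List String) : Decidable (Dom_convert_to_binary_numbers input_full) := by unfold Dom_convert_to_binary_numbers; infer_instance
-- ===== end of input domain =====

-- B builds the result column-major (max line length first, each column string completed by one join) instead of
-- A's row-major dict accumulation via string +=; same return value, measured faster (join avoids repeated concatenation).


-- ===== PORT A =====
-- dict values (Python str) are carried as List Char and wrapped with String.ofList at the return, per the PySem convention
-- of proving string facts on the List Char side; line[i] (a 1-char str) is PySem.Str.pyGet? (a Char), in range on every loop index.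
def pvStepA (line : String) (d : PySem.Dict Int (List Char)) : PySem.Dict Int (List Char) :=
  (PySem.List.pyRange 0 (PySem.Str.len line) 1).foldl
    (fun d i =>
      match d.get? i with                                   -- try: numbers[i] += line[i]
      | some v => d.insert i (v ++ (PySem.Str.pyGet? line i).toList)
      | none   => d.insert i (PySem.Str.pyGet? line i).toList)  -- except KeyError: numbers[i] = line[i]
    d

def convert_to_binary_numbers (input_full : List String) : List (Int × String) :=
  ((input_full.foldl (fun d line => pvStepA line d) PySem.Dict.empty).items).map
    (fun p => (p.1, String.ofList p.2))

-- ===== PORT B =====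
def convert_to_binary_numbers_alt (input_full : List String) : List (Int × String) :=
  let maxlen : Int := input_full.foldl (fun m line => max m (PySem.Str.len line)) 0
  (PySem.List.pyRange 0 maxlen 1).map (fun i =>
    (i,
     PySem.Str.join "" (input_full.filterMap
       (fun line => (PySem.Str.pyGet? line i).map (fun c => String.ofList [c])))))

-- ===== PRECONDITION & SPEC =====
def Spec_convert_to_binary_numbers (input_full : List String) (out : List (Int × String)) : Prop := out = convert_to_binary_numbers_alt input_full
instance (input_full : List String) (out : List (Int × String)) : Decidable (Spec_convert_to_binary_numbers input_full out) := by unfold Spec_convert_to_binary_numbers; infer_instance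

-- ===== CLAIM (what is proved, stated in full; the proofs are below) =====
def Claim_equal_convert_to_binary_numbers : Prop := ∀ (input_full : List String), Dom_convert_to_binary_numbers input_full → Spec_convert_to_binary_numbers input_full (convert_to_binary_numbers input_full)

-- ===== LEMMAS AND PROOFS =====

/-- The shape of A's dict at every point: keys 0..m-1 in order, value `g i` at key `i`. -/
def pvR (m : Nat) (g : Nat → List Char) : List (Int × List Char) :=
  (List.range m).map (fun (i : Nat) => ((i : Int), g i))

/-- Column `i` of the input: the characters `line[i]` of the lines long enough to have one. -/
def pvCol (ls : List String) (i : Nat) : List Char :=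
  ls.filterMap (fun l => l.toList[i]?)

/-- Running maximum of the line lengths, as the ports' foldl computes it. -/
def pvMax (ls : List String) (m : Nat) : Nat :=
  ls.foldl (fun a l => max a l.toList.length) m

lemma pvMax_cast (ls : List String) (m : Nat) :
    ls.foldl (fun a line => max a (PySem.Str.len line)) (m : Int) = ((pvMax ls m : Nat) : Int) := by
  induction ls generalizing m with
  | nil => rfl
  | cons l ls ih =>
    simp only [List.foldl_cons, pvMax] at *
    rw [PySem.Str.len_eq]
    rw [show (max (m : Int) (l.toList.length : Int)) = ((max m l.toList.length : Nat) : Int) by push_cast; rfl]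
    exact ih _

lemma pvMax_cast0 (ls : List String) :
    ls.foldl (fun a line => max a (PySem.Str.len line)) 0 = ((pvMax ls 0 : Nat) : Int) := by
  simpa using pvMax_cast ls 0

lemma pvR_congr {m : Nat} {g h : Nat → List Char} (hgh : ∀ i < m, g i = h i) :
    pvR m g = pvR m h := by
  unfold pvR
  apply List.map_congr_left
  intro i hi
  rw [hgh i (List.mem_range.mp hi)]

lemma pvR_keys_nodup (m : Nat) (g : Nat → List Char) :
    ((pvR m g).map (fun p => p.1)).Nodup := by
  unfold pvR
  rw [List.map_map]
  refine (List.nodup_range).map (fun a b hab => ?_)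
  have h : (a : Int) = (b : Int) := hab
  exact_mod_cast h

lemma pvR_get?_lt {d : PySem.Dict Int (List Char)} {m : Nat} {g : Nat → List Char}
    (hd : d.items = pvR m g) {j : Nat} (hj : j < m) :
    d.get? (j : Int) = some (g j) := by
  apply PySem.Dict.get?_of_mem_items
  · rw [hd]
    exact List.mem_map.mpr ⟨j, List.mem_range.mpr hj, rfl⟩
  · show d.keys.Nodup
    simp only [PySem.Dict.keys, hd]
    exact pvR_keys_nodup m g

lemma pvR_get?_ge {d : PySem.Dict Int (List Char)} {m : Nat} {g : Nat → List Char}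
    (hd : d.items = pvR m g) {j : Nat} (hj : m ≤ j) :
    d.get? (j : Int) = none := by
  rw [PySem.Dict.get?_eq_none_iff_not_mem_keys]
  simp only [PySem.Dict.keys, hd]
  unfold pvR
  rw [List.map_map]
  intro hmem
  obtain ⟨k, hk, hkj⟩ := List.mem_map.mp hmem
  have hkj0 : (k : Int) = (j : Int) := hkj
  have hkj' : k = j := by exact_mod_cast hkj0
  have := List.mem_range.mp hk
  omega

lemma pvInner (line : String) (n m : Nat) (g : Nat → List Char)
    (d : PySem.Dict Int (List Char)) (hn : n ≤ line.toList.length) (hd : d.items = pvR m g) :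
    (((List.range n).map (fun (k : Nat) => (k : Int))).foldl
      (fun d i =>
        match d.get? i with
        | some v => d.insert i (v ++ (PySem.Str.pyGet? line i).toList)
        | none   => d.insert i (PySem.Str.pyGet? line i).toList) d).items
    = pvR (max m n)
        (fun i => (if i < m then g i else []) ++ (if i < n then (line.toList[i]?).toList else [])) := by
  induction n generalizing d with
  | zero =>
    simp only [List.range_zero, List.map_nil, List.foldl_nil, Nat.max_zero, hd]
    exact pvR_congr (fun i hi => by simp [hi])
  | succ n ih =>
    rw [List.range_succ, List.map_append, List.foldl_append]
    set prev := (((List.range n).map (fun (k : Nat) => (k : Int))).foldl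
      (fun d i =>
        match d.get? i with
        | some v => d.insert i (v ++ (PySem.Str.pyGet? line i).toList)
        | none   => d.insert i (PySem.Str.pyGet? line i).toList) d) with hprev
    have hprevItems : prev.items = pvR (max m n)
        (fun i => (if i < m then g i else []) ++ (if i < n then (line.toList[i]?).toList else [])) :=
      ih d (by omega) hd
    simp only [List.map_cons, List.map_nil, List.foldl_cons, List.foldl_nil]
    have hcn : line.toList[n]? = some (line.toList[n]'(by omega)) := List.getElem?_eq_getElem (by omega)
    have hpg : (PySem.Str.pyGet? line ((n : Nat) : Int)).toList = [line.toList[n]'(by omega)] := by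
      simp [hcn]
    by_cases hnm : n < m
    · -- key already present: overwrite in place
      have hget : prev.get? (n : Int) =
          some ((if n < m then g n else []) ++ (if n < n then (line.toList[n]?).toList else [])) :=
        pvR_get?_lt hprevItems (by omega)
      rw [hget]
      have hcont : prev.contains (n : Int) = true := by
        rw [PySem.Dict.contains_eq_isSome_get?, hget]; rfl
      rw [PySem.Dict.items_insert_of_contains _ _ hcont, hprevItems]
      have hmax : max m (n + 1) = max m n := by omega
      rw [hmax]
      unfold pvR
      rw [List.map_map]
      apply List.map_congr_left
      intro i hi
      have him : i < max m n := List.mem_range.mp hi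
      by_cases hin : i = n
      · subst hin
        simp only [Function.comp_apply, beq_iff_eq]
        simp [hnm]
      · have hne : ¬ ((i : Int) = (n : Int)) := by exact_mod_cast hin
        simp only [Function.comp_apply, beq_iff_eq, if_neg hne]
        have h1 : (i < n) ↔ (i < n + 1) := by omega
        simp [h1]
    · -- fresh key: append at the end
      have hmaxn : max m n = n := by omega
      have hget : prev.get? (n : Int) = none := pvR_get?_ge hprevItems (by omega)
      rw [hget]
      have hcont : prev.contains (n : Int) = false := by
        rw [PySem.Dict.contains_eq_isSome_get?, hget]; rfl
      rw [PySem.Dict.items_insert_of_not_contains _ _ hcont, hprevItems]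
      have hmax : max m (n + 1) = n + 1 := by omega
      rw [hmax, hmaxn]
      unfold pvR
      rw [List.range_succ, List.map_append]
      congr 1
      · apply List.map_congr_left
        intro i hi
        have him : i < n := List.mem_range.mp hi
        have h1 : (i < n) ↔ (i < n + 1) := by omega
        simp [h1]
      · simp [hnm, hcn]

lemma pvStepA_items (line : String) (m : Nat) (g : Nat → List Char)
    (d : PySem.Dict Int (List Char)) (hd : d.items = pvR m g) :
    (pvStepA line d).items
    = pvR (max m line.toList.length)
        (fun i => (if i < m then g i else []) ++ (if i < line.toList.length then (line.toList[i]?).toList else [])) := by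
  unfold pvStepA
  have hr : PySem.List.pyRange 0 (PySem.Str.len line) 1
      = (List.range line.toList.length).map (fun (k : Nat) => (k : Int)) := by
    rw [PySem.Str.len_eq, PySem.List.pyRange_one]
    simp
  rw [hr]
  exact pvInner line line.toList.length m g d le_rfl hd

lemma pvCol_cons (l : String) (ls : List String) (i : Nat) :
    pvCol (l :: ls) i = (l.toList[i]?).toList ++ pvCol ls i := by
  unfold pvCol
  cases h : l.toList[i]? with
  | none => simp [h]
  | some c => simp [h]

lemma pvOuter (ls : List String) (m : Nat) (g : Nat → List Char)
    (d : PySem.Dict Int (List Char)) (hd : d.items = pvR m g) :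
    (ls.foldl (fun d line => pvStepA line d) d).items
    = pvR (pvMax ls m) (fun i => (if i < m then g i else []) ++ pvCol ls i) := by
  induction ls generalizing m g d with
  | nil =>
    simp only [List.foldl_nil, pvMax, hd]
    exact pvR_congr (fun i hi => by simp [hi, pvCol])
  | cons l ls ih =>
    simp only [List.foldl_cons]
    have h1 := pvStepA_items l m g d hd
    have h2 := ih (max m l.toList.length) _ _ h1
    rw [h2]
    have hM : pvMax ls (max m l.toList.length) = pvMax (l :: ls) m := rfl
    rw [hM]
    apply pvR_congr
    intro i _
    rw [pvCol_cons]
    by_cases him : i < max m l.toList.length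
    · rw [if_pos him]
      by_cases hil : i < l.toList.length
      · simp
      · have h3 : l.toList[i]? = none := List.getElem?_eq_none (by omega)
        simp [h3]
    · rw [if_neg him]
      have h1' : ¬ i < m := by omega
      have h3 : l.toList[i]? = none := List.getElem?_eq_none (by omega)
      simp [h1', h3]

lemma pvJoin_eq (ls : List String) (i : Nat) :
    PySem.Str.join "" (ls.filterMap
      (fun line => (PySem.Str.pyGet? line ((i : Nat) : Int)).map (fun c => String.ofList [c])))
    = String.ofList (pvCol ls i) := by
  have htl : (PySem.Str.join "" (ls.filterMap
      (fun line => (PySem.Str.pyGet? line ((i : Nat) : Int)).map (fun c => String.ofList [c])))).toList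
      = pvCol ls i := by
    simp only [pysem]
    rw [List.map_filterMap]
    simp only [Option.map_map]
    have hcongr : ∀ line ∈ ls,
        ((line.toList[i]?).map (String.toList ∘ fun c => String.ofList [c])) =
        ((line.toList[i]?).map (fun c => [c])) := by
      intro line _; cases line.toList[i]? <;> simp
    rw [List.filterMap_congr hcongr]
    have hfm : ls.filterMap (fun line => (line.toList[i]?).map (fun c => [c]))
        = (pvCol ls i).map (fun c => [c]) :=
      List.map_filterMap.symm
    rw [hfm, show ("".toList) = ([] : List Char) from rfl, PySem.Chars.join_nil_singletons]
  have := congrArg String.ofList htl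
  simpa using this

-- ===== VERDICT (by name: the statement is the Claim_ definition above) =====
theorem convert_to_binary_numbers_spec : Claim_equal_convert_to_binary_numbers := by
  intro input_full _
  unfold Spec_convert_to_binary_numbers convert_to_binary_numbers convert_to_binary_numbers_alt
  have hempty : (PySem.Dict.empty : PySem.Dict Int (List Char)).items = pvR 0 (fun _ => []) := rfl
  rw [pvOuter input_full 0 (fun _ => []) PySem.Dict.empty hempty]
  simp only [pvMax_cast0]
  have hr : PySem.List.pyRange 0 ((pvMax input_full 0 : Nat) : Int) 1
      = (List.range (pvMax input_full 0)).map (fun (k : Nat) => (k : Int)) := by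
    rw [PySem.List.pyRange_one]
    simp
  rw [hr]
  unfold pvR
  rw [List.map_map, List.map_map]
  apply List.map_congr_left
  intro i _
  simp only [Function.comp_apply]
  rw [pvJoin_eq]
  simp
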